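-- pv_equiv track=rewrite | github.com/Horse64/core.horse64.org | tools/translator_syntaxhelpers.py | nextnonblankidx
-- ===== SOURCE A (Python) =====
-- def nextnonblankidx(t, idx, no=1):
--     while no > 0:
--         idx += 1
--         while (idx < len(t) and
--                 t[idx].strip(" \r\n\t") == ""):
--             idx += 1
--         no -= 1
--     if idx >= len(t):
--         return -1
--     return idx
-- ===== SOURCE B (Python) =====
-- def nextnonblankidx(t, idx, no=1):
--     # Staged passes: first build the list of ALL non-blank positions after idx,
--     # then pick the no-th one by indexing, instead of A's nested scanning loops.
--     if no <= 0:
--         return idx if idx < len(t) else -1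
--     hits = [i for i in range(idx + 1, len(t)) if t[i].strip(" \r\n\t") != ""]
--     return hits[no - 1] if no <= len(hits) else -1
-- ===== Notes on version B (the rewrite author's own statement) =====
-- stated objective: simpler
-- what changed: Replaces A's nested while-loops with early exit by two staged passes: a comprehension collects every non-blank position after idx into a list, and the answer is that list's (no-1)-th element (or -1 if it is too short); no<=0 becomes one explicit guard.
import Mathlib
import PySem

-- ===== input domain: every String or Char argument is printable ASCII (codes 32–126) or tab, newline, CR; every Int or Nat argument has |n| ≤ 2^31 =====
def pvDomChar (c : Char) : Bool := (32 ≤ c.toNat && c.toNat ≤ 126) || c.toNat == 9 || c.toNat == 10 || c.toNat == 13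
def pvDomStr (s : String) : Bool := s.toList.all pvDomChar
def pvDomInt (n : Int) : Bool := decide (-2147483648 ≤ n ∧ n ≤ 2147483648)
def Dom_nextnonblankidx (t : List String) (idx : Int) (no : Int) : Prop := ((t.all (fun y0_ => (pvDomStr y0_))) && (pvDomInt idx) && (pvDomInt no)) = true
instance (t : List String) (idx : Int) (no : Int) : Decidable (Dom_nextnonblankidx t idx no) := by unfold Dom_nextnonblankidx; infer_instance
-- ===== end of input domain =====

-- B replaces A's nested while-loops by two staged passes: collect all non-blank positions, then index (simpler decomposition, same values).

-- t[i].strip(" \r\n\t") == ""  (Python indexing; under Pre_ every evaluated access is in range,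
-- so pyGetD's default "?" is never read)
def pvBlankAt (t : List String) (i : Int) : Bool :=
  PySem.Str.stripChars (PySem.List.pyGetD t i "?") " \r\n\t" == ""

-- ===== PORT A =====
-- inner 'while idx < len(t) and t[idx].strip(" \r\n\t") == "": idx += 1'
def pvAInner (t : List String) (idx : Int) : Int :=
  if idx < (t.length : Int) ∧ pvBlankAt t idx then pvAInner t (idx + 1) else idx
termination_by ((t.length : Int) - idx).toNat
decreasing_by omega

-- outer 'while no > 0: idx += 1; <inner>; no -= 1'
def pvAOuter (t : List String) (idx : Int) (no : Int) : Int :=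
  if no > 0 then pvAOuter t (pvAInner t (idx + 1)) (no - 1) else idx
termination_by no.toNat
decreasing_by omega

def nextnonblankidx (t : List String) (idx : Int) (no : Int) : Int :=
  let r := pvAOuter t idx no
  if r ≥ (t.length : Int) then -1 else r

-- ===== PORT B =====
-- 'hits = [i for i in range(idx + 1, len(t)) if t[i].strip(" \r\n\t") != ""]'
def pvHits (t : List String) (idx : Int) : List Int :=
  (PySem.List.pyRange (idx + 1) (t.length : Int) 1).filter (fun i => !pvBlankAt t i)

-- 'hits[no - 1]': under the guard 'no <= len(hits)' the index is in range, so the default 0 is never read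
def nextnonblankidx_alt (t : List String) (idx : Int) (no : Int) : Int :=
  if no ≤ 0 then (if idx < (t.length : Int) then idx else -1)
  else
    let hits := pvHits t idx
    if no ≤ (hits.length : Int) then PySem.List.pyGetD hits (no - 1) 0 else -1

-- ===== PRECONDITION & SPEC =====
-- Pre_ excludes exactly the inputs where the Python A raises IndexError (the scan's first index
-- idx+1 runs off the front of t under Python negative indexing); Python B raises there too.
def Pre_nextnonblankidx (t : List String) (idx : Int) (no : Int) : Prop :=
  no ≤ 0 ∨ -(t.length : Int) ≤ idx + 1
instance (t : List String) (idx : Int) (no : Int) : Decidable (Pre_nextnonblankidx t idx no) := by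
  unfold Pre_nextnonblankidx; infer_instance

def pvWitness_nextnonblankidx : List String × Int × Int := (["", " x", "\t", "y"], 0, 2)

def Spec_nextnonblankidx (t : List String) (idx : Int) (no : Int) (out : Int) : Prop := out = nextnonblankidx_alt t idx no
instance (t : List String) (idx : Int) (no : Int) (out : Int) : Decidable (Spec_nextnonblankidx t idx no out) := by unfold Spec_nextnonblankidx; infer_instance

-- ===== CLAIM =====
def Claim_equal_nextnonblankidx : Prop := ∀ (t : List String) (idx : Int) (no : Int), Dom_nextnonblankidx t idx no → Pre_nextnonblankidx t idx no → Spec_nextnonblankidx t idx no (nextnonblankidx t idx no)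

-- ===== LEMMAS AND PROOFS =====

theorem pvAOuter_pos (t : List String) (idx : Int) (no : Int) (h : no > 0) :
    pvAOuter t idx no = pvAOuter t (pvAInner t (idx + 1)) (no - 1) := by
  rw [pvAOuter, if_pos h]

theorem pvAOuter_zero (t : List String) (idx : Int) (no : Int) (h : ¬ no > 0) :
    pvAOuter t idx no = idx := by
  rw [pvAOuter, if_neg h]

theorem pvAInner_step (t : List String) (idx : Int)
    (h : idx < (t.length : Int) ∧ pvBlankAt t idx) :
    pvAInner t idx = pvAInner t (idx + 1) := by
  rw [pvAInner, if_pos h]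

theorem pvAInner_stop (t : List String) (idx : Int)
    (h : ¬ (idx < (t.length : Int) ∧ pvBlankAt t idx)) :
    pvAInner t idx = idx := by
  rw [pvAInner, if_neg h]

-- once past the end, the inner loop never moves and each outer iteration just adds 1
theorem pvAOuter_past_end (t : List String) (idx : Int) (no : Int)
    (h : idx ≥ (t.length : Int)) : pvAOuter t idx no ≥ (t.length : Int) := by
  by_cases hno : no > 0
  · rw [pvAOuter_pos t idx no hno,
      pvAInner_stop t (idx + 1) (fun hc => absurd hc.1 (by omega))]
    exact pvAOuter_past_end t (idx + 1) (no - 1) (by omega)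
  · rw [pvAOuter_zero t idx no hno]; exact h
termination_by no.toNat
decreasing_by omega

-- Python indexing into a cons cell at a positive index steps to the tail
theorem pvGetD_cons_pos (a : Int) (l : List Int) (k : Int) (h : 1 ≤ k) :
    PySem.List.pyGetD (a :: l) k 0 = PySem.List.pyGetD l (k - 1) 0 := by
  have hk : k.toNat = (k - 1).toNat + 1 := by omega
  have h1 := PySem.List.pyGet?_of_nonneg (xs := a :: l) (i := k) (by omega)
  have h2 := PySem.List.pyGet?_of_nonneg (xs := l) (i := k - 1) (by omega)
  simp only [PySem.List.pyGetD, h1, h2, hk, List.getElem?_cons_succ]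

-- B's staged formula, as a function of the scan start (proof-side view of B)
def pvBGet (t : List String) (i : Int) (no : Int) : Int :=
  if no ≤ ((pvHits t i).length : Int) then PySem.List.pyGetD (pvHits t i) (no - 1) 0 else -1

theorem pvHits_nil (t : List String) (i : Int) (h : i + 1 ≥ (t.length : Int)) :
    pvHits t i = [] := by
  unfold pvHits
  rw [PySem.List.pyRange_one_eq_nil (by omega)]
  rfl

theorem pvHits_cons (t : List String) (i : Int) (h : i + 1 < (t.length : Int)) :
    pvHits t i = (if !pvBlankAt t (i + 1) then [i + 1] else []) ++ pvHits t (i + 1) := by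
  unfold pvHits
  rw [PySem.List.pyRange_one_cons h, List.filter_cons]
  by_cases hb : pvBlankAt t (i + 1) <;> simp [hb]

-- core correspondence: A's remaining outer iterations + final bounds check vs B's staged lookup
theorem pvA_eq_bget (t : List String) (i : Int) (no : Int) (hno : 1 ≤ no) :
    (if pvAOuter t (pvAInner t (i + 1)) (no - 1) ≥ (t.length : Int) then -1
      else pvAOuter t (pvAInner t (i + 1)) (no - 1)) = pvBGet t i no := by
  by_cases hend : i + 1 ≥ (t.length : Int)
  · rw [pvAInner_stop t (i + 1) (fun hc => absurd hc.1 (by omega))]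
    rw [if_pos (pvAOuter_past_end t (i + 1) (no - 1) hend)]
    unfold pvBGet
    rw [pvHits_nil t i hend, if_neg (by simp only [List.length_nil]; omega)]
  · have hlt : i + 1 < (t.length : Int) := by omega
    by_cases hb : pvBlankAt t (i + 1)
    · have hH : pvHits t i = pvHits t (i + 1) := by
        rw [pvHits_cons t i hlt]; simp [hb]
      rw [pvAInner_step t (i + 1) ⟨hlt, hb⟩]
      rw [pvA_eq_bget t (i + 1) no hno]
      unfold pvBGet
      rw [hH]
    · have hH : pvHits t i = (i + 1) :: pvHits t (i + 1) := by
        rw [pvHits_cons t i hlt]; simp [hb]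
      rw [pvAInner_stop t (i + 1) (fun hc => hb hc.2)]
      by_cases h1 : no = 1
      · subst h1
        rw [pvAOuter_zero t (i + 1) (1 - 1) (by omega), if_neg (by omega)]
        unfold pvBGet
        rw [hH, if_pos (by simp only [List.length_cons]; push_cast; omega)]
        simp [PySem.List.pyGetD_zero_cons]
      · rw [pvAOuter_pos t (i + 1) (no - 1) (by omega),
          pvA_eq_bget t (i + 1) (no - 1) (by omega)]
        unfold pvBGet
        rw [hH]
        by_cases hle : no - 1 ≤ ((pvHits t (i + 1)).length : Int)
        · rw [if_pos hle, if_pos (by simp only [List.length_cons]; push_cast; omega),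
            pvGetD_cons_pos (i + 1) (pvHits t (i + 1)) (no - 1) (by omega)]
        · rw [if_neg hle, if_neg (by simp only [List.length_cons]; push_cast; omega)]
termination_by ((t.length : Int) - i).toNat
decreasing_by all_goals omega

-- ===== VERDICT =====
theorem nextnonblankidx_spec : Claim_equal_nextnonblankidx := by
  intro t idx no _hDom _hPre
  unfold Spec_nextnonblankidx nextnonblankidx nextnonblankidx_alt
  by_cases hno : no ≤ 0
  · rw [if_pos hno]
    show (if pvAOuter t idx no ≥ (t.length : Int) then -1 else pvAOuter t idx no)
        = if idx < (t.length : Int) then idx else -1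
    rw [pvAOuter_zero t idx no (by omega)]
    by_cases h : idx < (t.length : Int)
    · rw [if_neg (by omega), if_pos h]
    · rw [if_pos (by omega), if_neg h]
  · rw [if_neg hno]
    show (if pvAOuter t idx no ≥ (t.length : Int) then -1 else pvAOuter t idx no)
        = if no ≤ ((pvHits t idx).length : Int) then PySem.List.pyGetD (pvHits t idx) (no - 1) 0 else -1
    rw [pvAOuter_pos t idx no (by omega)]
    exact pvA_eq_bget t idx no (by omega)
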